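-- pv_equiv track=rewrite | github.com/yjmaxpayne/q2m3 | examples/figure3_solvent_shell_snapshots.py | _atom_colors
-- ===== SOURCE A (Python) =====
-- ELEMENT_COLORS = {
--     "H": "#E8E8E8",
--     "O": "#D55E00",
--     "N": "#0072B2",
--     "C": "#222222",
-- }
--
-- def _atom_colors(symbols: list[str]) -> list[str]:
--     """Return atom colors, highlighting the H2 solute in blue."""
--     colors: list[str] = []
--     for index, symbol in enumerate(symbols):
--         if index < 2 and symbols[:2] == ["H", "H"]:
--             colors.append("#0072B2")
--         else:
--             colors.append(ELEMENT_COLORS.get(symbol, "#999999"))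
--     return colors
-- ===== SOURCE B (Python) =====
-- ELEMENT_COLORS = {
--     "H": "#E8E8E8",
--     "O": "#D55E00",
--     "N": "#0072B2",
--     "C": "#222222",
-- }
--
-- def _atom_colors(symbols: list[str]) -> list[str]:
--     """Return atom colors, highlighting the H2 solute in blue."""
--     colors = ["#999999"] * len(symbols)
--     for element, color in ELEMENT_COLORS.items():
--         for i, s in enumerate(symbols):
--             if s == element:
--                 colors[i] = color
--     if symbols[:2] == ["H", "H"]:
--         colors[0] = colors[1] = "#0072B2"
--     return colors
-- ===== Notes on version B (the rewrite author's own statement) =====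
-- stated objective: alternative
-- what changed: Instead of one pass over the atoms doing a dict lookup per atom, B preallocates the default-grey color array and loops over the fixed palette entries, painting the positions of each known element, then applies the H2 override to the first two slots.
import Mathlib
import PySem

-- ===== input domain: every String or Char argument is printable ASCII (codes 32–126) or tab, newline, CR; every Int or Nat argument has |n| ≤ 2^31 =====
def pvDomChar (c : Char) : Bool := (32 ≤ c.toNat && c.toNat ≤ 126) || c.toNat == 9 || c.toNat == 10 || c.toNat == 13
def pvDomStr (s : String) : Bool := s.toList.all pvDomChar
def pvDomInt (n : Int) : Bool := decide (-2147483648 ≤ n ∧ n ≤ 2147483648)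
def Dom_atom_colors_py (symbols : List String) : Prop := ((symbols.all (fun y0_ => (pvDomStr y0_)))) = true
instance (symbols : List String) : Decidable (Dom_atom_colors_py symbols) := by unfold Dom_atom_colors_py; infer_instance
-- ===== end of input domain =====

-- B paints a preallocated default-grey array one palette entry at a time (loop over the palette, not
-- a per-atom dict lookup), then applies the H2 override; objective: alternative.

-- ===== PORT A =====
def elementColors : PySem.Dict String String :=
  PySem.Dict.ofList [("H", "#E8E8E8"), ("O", "#D55E00"), ("N", "#0072B2"), ("C", "#222222")]

def atom_colors_py (symbols : List String) : List String :=
  (PySem.List.enumerate symbols 0).foldl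
    (fun colors p =>
      if p.1 < 2 ∧ PySem.List.slice symbols none (some 2) = ["H", "H"] then
        colors ++ ["#0072B2"]
      else
        colors ++ [PySem.Dict.getD elementColors p.2 "#999999"])
    []

-- ===== PORT B =====
def atom_colors_py_alt (symbols : List String) : List String :=
  let colors0 := PySem.List.pyRepeat ["#999999"] (symbols.length : Int)
  let colors1 := (PySem.Dict.items elementColors).foldl
    (fun cs ec =>
      (PySem.List.enumerate symbols 0).foldl
        (fun cs p => if p.2 == ec.1 then PySem.List.pySetD cs p.1 ec.2 else cs) cs)
    colors0
  if PySem.List.slice symbols none (some 2) = ["H", "H"] then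
    PySem.List.pySetD (PySem.List.pySetD colors1 1 "#0072B2") 0 "#0072B2"
  else colors1

-- ===== PRECONDITION & SPEC =====
def Spec_atom_colors_py (symbols : List String) (out : List String) : Prop := out = atom_colors_py_alt symbols
instance (symbols : List String) (out : List String) : Decidable (Spec_atom_colors_py symbols out) := by unfold Spec_atom_colors_py; infer_instance

-- ===== CLAIM (what is proved, stated in full; the proofs are below) =====
def Claim_equal_atom_colors_py : Prop := ∀ (symbols : List String), Dom_atom_colors_py symbols → Spec_atom_colors_py symbols (atom_colors_py symbols)

-- ===== LEMMAS AND PROOFS =====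

def colorOf (s : String) : String := PySem.Dict.getD elementColors s "#999999"

-- common normal form of both programs
def specForm (symbols : List String) : List String :=
  if PySem.List.slice symbols none (some 2) = ["H", "H"] then
    "#0072B2" :: "#0072B2" :: (symbols.drop 2).map colorOf
  else
    symbols.map colorOf

theorem colorOf_cases (s : String) :
    colorOf s = if s = "H" then "#E8E8E8" else if s = "O" then "#D55E00"
      else if s = "N" then "#0072B2" else if s = "C" then "#222222" else "#999999" := by
  unfold colorOf elementColors
  split_ifs with h1 h2 h3 h4
  · subst h1; decide
  · subst h2; decide
  · subst h3; decide
  · subst h4; decide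
  · have e1 : ("H" == s) = false := by simp [Ne.symm h1]
    have e2 : ("O" == s) = false := by simp [Ne.symm h2]
    have e3 : ("N" == s) = false := by simp [Ne.symm h3]
    have e4 : ("C" == s) = false := by simp [Ne.symm h4]
    simp [PySem.Dict.getD, PySem.Dict.get?, PySem.Dict.ofList, PySem.Dict.empty,
      PySem.Dict.update, PySem.Dict.insert, List.find?, e1, e2, e3, e4]

-- ---- A side ----

theorem atom_colors_py_eq_map (symbols : List String) :
    atom_colors_py symbols =
      (PySem.List.enumerate symbols 0).map
        (fun p =>
          if p.1 < 2 ∧ PySem.List.slice symbols none (some 2) = ["H", "H"] then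
            "#0072B2"
          else
            PySem.Dict.getD elementColors p.2 "#999999") := by
  unfold atom_colors_py
  have hfun : ∀ (colors : List String) (p : Int × String),
      (if p.1 < 2 ∧ PySem.List.slice symbols none (some 2) = ["H", "H"] then
        colors ++ ["#0072B2"]
      else
        colors ++ [PySem.Dict.getD elementColors p.2 "#999999"]) =
      colors ++ [if p.1 < 2 ∧ PySem.List.slice symbols none (some 2) = ["H", "H"] then
        "#0072B2" else PySem.Dict.getD elementColors p.2 "#999999"] := by
    intro colors p; split <;> rfl
  simp only [hfun]
  rw [PySem.List.foldl_append_singleton_eq_map]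
  simp

theorem enumerate_fst_ge (rest : List String) (s : Int) (p : Int × String)
    (hp : p ∈ PySem.List.enumerate rest s) : s ≤ p.1 := by
  rcases (PySem.List.mem_enumerate_iff _ _ _).1 hp with ⟨k, hk, rfl⟩
  simp

theorem a_eq_specForm (symbols : List String) :
    atom_colors_py symbols = specForm symbols := by
  rw [atom_colors_py_eq_map]
  unfold specForm
  by_cases h : PySem.List.slice symbols none (some 2) = ["H", "H"]
  · rw [PySem.List.slice_to symbols (by omega : (0:Int) ≤ 2)] at h
    match symbols, h with
    | a :: b :: rest, h =>
      obtain ⟨rfl, rfl⟩ : a = "H" ∧ b = "H" := by simpa using h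
      have hsl : PySem.List.slice ("H" :: "H" :: rest) none (some 2) = ["H", "H"] := by
        rw [PySem.List.slice_to _ (by omega : (0:Int) ≤ 2)]; rfl
      simp only [PySem.List.enumerate_cons, List.map_cons]
      rw [if_pos ⟨by omega, hsl⟩, if_pos ⟨by omega, hsl⟩, if_pos hsl]
      simp only [List.drop_succ_cons, List.drop_zero, List.cons.injEq, true_and]
      have h2 : (0:Int) + 1 + 1 = 2 := by norm_num
      rw [h2]
      calc (PySem.List.enumerate rest 2).map
              (fun p => if p.1 < 2 ∧ PySem.List.slice ("H" :: "H" :: rest) none (some 2) = ["H", "H"]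
                        then "#0072B2" else PySem.Dict.getD elementColors p.2 "#999999")
          = (PySem.List.enumerate rest 2).map
              (fun p => PySem.Dict.getD elementColors p.2 "#999999") := by
            apply List.map_congr_left
            intro p hp
            rw [if_neg]
            rintro ⟨hlt, -⟩
            have := enumerate_fst_ge rest 2 p hp
            omega
        _ = rest.map colorOf := by
            conv_rhs => rw [← PySem.List.map_snd_enumerate rest 2, List.map_map]
            rfl
  · rw [if_neg h]
    calc (PySem.List.enumerate symbols).map
            (fun p => if p.1 < 2 ∧ PySem.List.slice symbols none (some 2) = ["H", "H"]
                      then "#0072B2" else PySem.Dict.getD elementColors p.2 "#999999")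
        = (PySem.List.enumerate symbols).map
            (fun p => PySem.Dict.getD elementColors p.2 "#999999") := by
          apply List.map_congr_left
          intro p hp
          rw [if_neg]
          rintro ⟨-, hsl⟩
          exact h hsl
      _ = symbols.map colorOf := by
          conv_rhs => rw [← PySem.List.map_snd_enumerate symbols 0, List.map_map]
          rfl

-- ---- B side ----

-- one painting pass of B's inner loop, in structural form
def paintFrom (el c : String) : List String → Nat → List String → List String
  | [], _, cs => cs
  | x :: xs, m, cs => paintFrom el c xs (m + 1) (if x == el then cs.set m c else cs)

theorem fold_eq_paintFrom (el c : String) (rest : List String) (m : Nat) (cs : List String) :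
    (PySem.List.enumerate rest (m : Int)).foldl
      (fun cs p => if p.2 == el then PySem.List.pySetD cs p.1 c else cs) cs
    = paintFrom el c rest m cs := by
  induction rest generalizing m cs with
  | nil => rfl
  | cons x xs ih =>
    rw [PySem.List.enumerate_cons, List.foldl_cons]
    have h1 : ((m : Int) + 1) = ((m + 1 : Nat) : Int) := by push_cast; ring
    simp only [PySem.List.pySetD_natCast]
    rw [h1, ih]
    rfl

theorem length_paintFrom (el c : String) (rest : List String) (m : Nat) (cs : List String) :
    (paintFrom el c rest m cs).length = cs.length := by
  induction rest generalizing m cs with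
  | nil => rfl
  | cons x xs ih =>
    show (paintFrom el c xs (m + 1) (if x == el then cs.set m c else cs)).length = cs.length
    rw [ih]
    split <;> simp

theorem paintFrom_getElem? (el c : String) (rest : List String) (m : Nat) (cs : List String)
    (hlen : m + rest.length ≤ cs.length) (j : Nat) :
    (paintFrom el c rest m cs)[j]? =
      if m ≤ j ∧ j - m < rest.length ∧ rest[j - m]? = some el then some c else cs[j]? := by
  induction rest generalizing m cs with
  | nil => simp [paintFrom]
  | cons x xs ih =>
    simp only [List.length_cons] at hlen
    have hcsl : (if x == el then cs.set m c else cs).length = cs.length := by split <;> simp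
    have hlen' : (m + 1) + xs.length ≤ (if x == el then cs.set m c else cs).length := by
      rw [hcsl]; omega
    show (paintFrom el c xs (m + 1) (if x == el then cs.set m c else cs))[j]? = _
    rw [ih _ _ hlen']
    by_cases hj : m ≤ j
    · by_cases hjm : j = m
      · subst hjm
        have hA : ¬ (j + 1 ≤ j ∧ j - (j + 1) < xs.length ∧ xs[j - (j + 1)]? = some el) := by
          rintro ⟨h, -, -⟩; omega
        rw [if_neg hA]
        simp only [Nat.sub_self, List.length_cons, List.getElem?_cons_zero]
        by_cases hx : x = el
        · have hB : j ≤ j ∧ 0 < xs.length + 1 ∧ some x = some el :=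
            ⟨le_refl _, by omega, by simp [hx]⟩
          rw [if_pos hB, if_pos (show (x == el) = true by simp [hx])]
          simp [(by omega : j < cs.length)]
        · have hB : ¬ (j ≤ j ∧ 0 < xs.length + 1 ∧ some x = some el) := by
            rintro ⟨-, -, h⟩; exact hx (by simpa using h)
          rw [if_neg hB, if_neg (show ¬ ((x == el) = true) by simp [hx])]
      · have h2 : j - m = (j - (m + 1)) + 1 := by omega
        have hidx : (x :: xs)[j - m]? = xs[j - (m + 1)]? := by rw [h2]; simp
        have hset : (if x == el then cs.set m c else cs)[j]? = cs[j]? := by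
          split
          · exact List.getElem?_set_ne (fun h => hjm (h.symm))
          · rfl
        rw [hidx, hset]
        by_cases hx : xs[j - (m + 1)]? = some el
        · simp only [hx, List.length_cons, and_true]
          split_ifs with ha hb hb <;> first | rfl | omega
        · simp [hx]
    · have hset : (if x == el then cs.set m c else cs)[j]? = cs[j]? := by
        split
        · exact List.getElem?_set_ne (fun h => by omega)
        · rfl
      have hA : ¬ (m + 1 ≤ j ∧ j - (m + 1) < xs.length ∧ xs[j - (m + 1)]? = some el) := by
        rintro ⟨h, -, -⟩; omega
      have hB : ¬ (m ≤ j ∧ j - m < (x :: xs).length ∧ (x :: xs)[j - m]? = some el) := by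
        rintro ⟨h, -, -⟩; omega
      rw [if_neg hA, if_neg hB, hset]

theorem b_paint_eq_map (symbols : List String) :
    (PySem.Dict.items elementColors).foldl
      (fun cs ec =>
        (PySem.List.enumerate symbols 0).foldl
          (fun cs p => if p.2 == ec.1 then PySem.List.pySetD cs p.1 ec.2 else cs) cs)
      (PySem.List.pyRepeat ["#999999"] (symbols.length : Int))
    = symbols.map colorOf := by
  have hrep : PySem.List.pyRepeat ["#999999"] (symbols.length : Int)
      = List.replicate symbols.length "#999999" := by
    rw [PySem.List.pyRepeat_singleton]; simp
  have hitems : PySem.Dict.items elementColors =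
      [("H", "#E8E8E8"), ("O", "#D55E00"), ("N", "#0072B2"), ("C", "#222222")] := by decide
  rw [hrep, hitems]
  simp only [List.foldl_cons, List.foldl_nil]
  rw [show ((0 : Int)) = ((0 : Nat) : Int) from rfl]
  rw [fold_eq_paintFrom, fold_eq_paintFrom, fold_eq_paintFrom, fold_eq_paintFrom]
  set cs0 := List.replicate symbols.length "#999999" with hcs0
  set cs1 := paintFrom "H" "#E8E8E8" symbols 0 cs0 with hcs1
  set cs2 := paintFrom "O" "#D55E00" symbols 0 cs1 with hcs2
  set cs3 := paintFrom "N" "#0072B2" symbols 0 cs2 with hcs3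
  have L0 : cs0.length = symbols.length := by rw [hcs0]; simp
  have L1 : cs1.length = symbols.length := by rw [hcs1, length_paintFrom, L0]
  have L2 : cs2.length = symbols.length := by rw [hcs2, length_paintFrom, L1]
  have L3 : cs3.length = symbols.length := by rw [hcs3, length_paintFrom, L2]
  apply List.ext_getElem?
  intro j
  rw [paintFrom_getElem? _ _ _ _ _ (by omega) j, hcs3,
      paintFrom_getElem? _ _ _ _ _ (by omega) j, hcs2,
      paintFrom_getElem? _ _ _ _ _ (by omega) j, hcs1,
      paintFrom_getElem? _ _ _ _ _ (by omega) j, hcs0]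
  simp only [Nat.zero_le, Nat.sub_zero, true_and]
  by_cases hj : j < symbols.length
  · have hsym : symbols[j]? = some symbols[j] := List.getElem?_eq_getElem hj
    have hmap : (symbols.map colorOf)[j]? = some (colorOf symbols[j]) := by
      simp [List.getElem?_map, hsym]
    have hrepj : (List.replicate symbols.length "#999999")[j]? = some "#999999" := by
      simp [hj]
    rw [hmap, hsym, hrepj, colorOf_cases]
    split_ifs with h1 h2 h3 h4 <;> simp_all
  · have hsym : symbols[j]? = none := List.getElem?_eq_none (by omega)
    simp [hj]

theorem b_eq_specForm (symbols : List String) :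
    atom_colors_py_alt symbols = specForm symbols := by
  unfold atom_colors_py_alt specForm
  dsimp only
  rw [b_paint_eq_map]
  by_cases h : PySem.List.slice symbols none (some 2) = ["H", "H"]
  · rw [if_pos h, if_pos h]
    rw [PySem.List.slice_to symbols (by omega : (0:Int) ≤ 2)] at h
    match symbols, h with
    | a :: b :: rest, h =>
      obtain ⟨rfl, rfl⟩ : a = "H" ∧ b = "H" := by simpa using h
      simp only [List.map_cons, List.drop_succ_cons, List.drop_zero]
      rw [show ((1 : Int)) = ((1 : Nat) : Int) from rfl,
          show ((0 : Int)) = ((0 : Nat) : Int) from rfl,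
          PySem.List.pySetD_natCast, PySem.List.pySetD_natCast]
      rfl
  · rw [if_neg h, if_neg h]

-- ===== VERDICT (by name: the statement is the Claim_ definition above) =====
theorem atom_colors_py_spec : Claim_equal_atom_colors_py := by
  intro symbols _
  unfold Spec_atom_colors_py
  rw [a_eq_specForm, b_eq_specForm]
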